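-- pv_equiv track=rewrite | github.com/PiotrMatolicz/WW | dzien_4/funkcje/wiecej_niz_v1.py | wiecej_niz
-- ===== SOURCE A (Python) =====
-- def wiecej_niz(napis, liczba):
--     """Funkcja zwraca zbiór tych znaków, które w napisie występują więcej razy, niż argument liczba."""
--     slownik = {}
--     for znak in napis:
--         if znak in slownik:
--             slownik[znak] += 1
--         else:
--             slownik[znak] = 1
--
--     return {znak for znak in slownik if slownik[znak] > liczba}
-- ===== SOURCE B (Python) =====
-- def wiecej_niz(napis, liczba):
--     """Funkcja zwraca zbiór tych znaków, które w napisie występują więcej razy, niż argument liczba."""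
--     if not napis:
--         return set()
--     znak = napis[0]
--     reszta = napis.replace(znak, '')
--     wynik = {znak} if len(napis) - len(reszta) > liczba else set()
--     return wynik | wiecej_niz(reszta, liczba)
-- ===== Notes on version B (the rewrite author's own statement) =====
-- stated objective: alternative
-- what changed: B replaces A's dictionary-counting pass by a recursive partition: it peels off the first character, deletes all its copies with str.replace, decides membership by the length drop, and recurses on the shortened remainder, so no frequency table is ever built.
import Mathlib
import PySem

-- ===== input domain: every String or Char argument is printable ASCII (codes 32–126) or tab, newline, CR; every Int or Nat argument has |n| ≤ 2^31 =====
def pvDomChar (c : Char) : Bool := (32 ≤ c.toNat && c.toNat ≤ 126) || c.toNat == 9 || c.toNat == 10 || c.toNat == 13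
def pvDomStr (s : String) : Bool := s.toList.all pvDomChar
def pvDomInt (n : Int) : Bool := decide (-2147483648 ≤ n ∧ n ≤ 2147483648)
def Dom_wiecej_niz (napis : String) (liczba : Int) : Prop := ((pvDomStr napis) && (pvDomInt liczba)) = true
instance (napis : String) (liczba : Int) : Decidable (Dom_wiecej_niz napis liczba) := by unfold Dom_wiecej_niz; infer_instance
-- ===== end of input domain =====

-- B replaces A's dictionary-counting pass by a recursive partition: peel off the first character,
-- delete all its copies with replace, decide it by the length drop, and recurse on the remainder.

-- ===== PORT A =====
-- Port of A: build a character-count dict over napis, then keep the keys whose count exceeds liczba, as a set.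
def wiecej_niz (napis : String) (liczba : Int) : List String :=
  let slownik := napis.toList.foldl
    (fun d c =>
      let znak := String.ofList [c]
      if d.contains znak then d.modify znak 0 (· + 1) else d.insert znak 1)
    PySem.Dict.empty
  PySem.Set.ofList ((PySem.Dict.keys slownik).filter
    (fun znak => decide (liczba < slownik.getD znak 0)))

-- ===== PORT B =====
-- napis.replace(znak, '') with a one-character pattern deletes exactly the copies of that character
-- (needed by the port's termination argument, hence stated before the definition).
theorem replace_go_single (c : Char) :
    ∀ (fuel : Nat) (l acc : List Char), l.length ≤ fuel →
      PySem.Chars.replace.go [c] [] fuel l acc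
        = acc.reverse ++ l.filter (fun d => !(d == c)) := by
  intro fuel
  induction fuel with
  | zero =>
    intro l acc h
    have : l = [] := List.eq_nil_of_length_eq_zero (Nat.le_zero.mp h)
    subst this
    rw [PySem.Chars.replace.go]
    simp
  | succ n ih =>
    intro l acc h
    cases l with
    | nil =>
      rw [PySem.Chars.replace.go]
      · simp
      · omega
    | cons d t =>
      rw [PySem.Chars.replace.go]
      by_cases hdc : (d == c) = true
      · have hc : c = d := (beq_iff_eq.mp hdc).symm
        subst hc
        simp only [List.isPrefixOf, beq_self_eq_true, Bool.true_and,
          if_pos, List.length_cons, List.drop_succ_cons, List.length_nil, List.drop_zero,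
          List.reverse_nil, List.nil_append]
        rw [ih t acc (by simpa using h)]
        simp
      · rw [if_neg (by simp [List.isPrefixOf]; intro he; exact hdc (by simp [he]))]
        rw [ih t (d :: acc) (by simpa using h)]
        simp [hdc]

theorem replace_single_nil (c : Char) (cs : List Char) :
    PySem.Chars.replace cs [c] [] = cs.filter (fun d => !(d == c)) := by
  simpa [PySem.Chars.replace] using replace_go_single c cs.length cs [] le_rfl

-- Port of B (on napis.toList): if napis empty return set(); else znak = napis[0],
-- reszta = napis.replace(znak, ''), wynik = {znak} if the length drop exceeds liczba else set(),
-- return wynik | wiecej_niz(reszta, liczba).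
def wiecejNizGo (liczba : Int) : List Char → List String
  | [] => []
  | c :: t =>
    let reszta := PySem.Chars.replace (c :: t) [c] []
    let wynik : List String :=
      if liczba < ((c :: t).length : Int) - (reszta.length : Int) then [String.ofList [c]] else []
    PySem.Set.union wynik (wiecejNizGo liczba reszta)
termination_by cs => cs.length
decreasing_by
  simp only [replace_single_nil, List.filter_cons, beq_self_eq_true, Bool.not_true,
    Bool.false_eq_true, if_false, List.length_cons]
  have := List.length_filter_le (fun d => !(d == c)) t
  omega

def wiecej_niz_alt (napis : String) (liczba : Int) : List String :=
  wiecejNizGo liczba napis.toList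

-- ===== PRECONDITION & SPEC =====
def Spec_wiecej_niz (napis : String) (liczba : Int) (out : List String) : Prop := out = wiecej_niz_alt napis liczba
instance (napis : String) (liczba : Int) (out : List String) : Decidable (Spec_wiecej_niz napis liczba out) := by unfold Spec_wiecej_niz; infer_instance

-- ===== CLAIM (what is proved, stated in full; the proofs are below) =====
def Claim_equal_wiecej_niz : Prop := ∀ (napis : String) (liczba : Int), Dom_wiecej_niz napis liczba → Spec_wiecej_niz napis liczba (wiecej_niz napis liczba)

-- ===== LEMMAS AND PROOFS =====

-- the canonical value both ports compute: the distinct characters in first-occurrence order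
-- that occur more than liczba times, as single-char strings
def pvCanon (liczba : Int) (cs : List Char) : List String :=
  ((PySem.List.dedup cs).filter (fun d => decide (liczba < (cs.count d : Int)))).map
    (fun c => String.ofList [c])

theorem ofList_single_injective : Function.Injective (fun c : Char => String.ofList [c]) := by
  intro a b h
  simpa using congrArg String.toList h

-- adding an element already in the set is a no-op, so elements of the set may be filtered out
theorem foldl_add_skip {α : Type} [BEq α] [LawfulBEq α] (x : α) :
    ∀ (xs s : List α), x ∈ s →
      xs.foldl PySem.Set.add s = (xs.filter (fun y => !(y == x))).foldl PySem.Set.add s := by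
  intro xs
  induction xs with
  | nil => intro s _; rfl
  | cons y t ih =>
    intro s hx
    by_cases hy : y = x
    · subst hy
      have hadd : PySem.Set.add s y = s := by
        rw [PySem.Set.add, if_pos ((PySem.Set.contains_iff s y).mpr hx)]
      simp only [List.foldl_cons, List.filter_cons, beq_self_eq_true, Bool.not_true,
        Bool.false_eq_true, if_false, hadd]
      exact ih s hx
    · have hkeep : (!(y == x)) = true := by simp [hy]
      rw [List.foldl_cons, List.filter_cons, if_pos hkeep, List.foldl_cons]
      exact ih (PySem.Set.add s y) ((PySem.Set.mem_add s y x).mpr (Or.inl hx))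

-- an element absent from the remaining inserts stays in head position
theorem foldl_add_cons_out {α : Type} [BEq α] [LawfulBEq α] (x : α) :
    ∀ (xs s : List α), x ∉ xs →
      xs.foldl PySem.Set.add (x :: s) = x :: xs.foldl PySem.Set.add s := by
  intro xs
  induction xs with
  | nil => intro s _; rfl
  | cons y t ih =>
    intro s hx
    have hyx : ¬ (x = y) := fun h => hx (h ▸ List.mem_cons_self)
    have hcontains : PySem.Set.contains (x :: s) y = PySem.Set.contains s y := by
      simp only [PySem.Set.contains, List.contains_cons,
        beq_eq_false_iff_ne.mpr (fun h => hyx h.symm), Bool.false_or]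
    have hadd : PySem.Set.add (x :: s) y
        = x :: PySem.Set.add s y := by
      rw [PySem.Set.add, PySem.Set.add, hcontains]
      by_cases hc : PySem.Set.contains s y = true
      · rw [if_pos hc, if_pos hc]
      · rw [if_neg hc, if_neg hc]; rfl
    simp only [List.foldl_cons, hadd]
    exact ih (PySem.Set.add s y) (fun h => hx (List.mem_cons_of_mem _ h))

-- first-occurrence dedup, peeled one distinct element at a time
theorem dedup_cons_filter {α : Type} [BEq α] [LawfulBEq α] (x : α) (xs : List α) :
    PySem.List.dedup (x :: xs) = x :: PySem.List.dedup (xs.filter (fun y => !(y == x))) := by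
  have h1 : PySem.Set.add ([] : List α) x = [x] := by simp [PySem.Set.add, PySem.Set.contains]
  have hx : x ∉ xs.filter (fun y => !(y == x)) := by
    intro h
    simpa using (List.of_mem_filter h)
  calc PySem.List.dedup (x :: xs)
      = (x :: xs).foldl PySem.Set.add [] := by
        rw [PySem.List.dedup, PySem.Set.ofList_eq_foldl]
    _ = xs.foldl PySem.Set.add [x] := by rw [List.foldl_cons, h1]
    _ = (xs.filter (fun y => !(y == x))).foldl PySem.Set.add [x] :=
        foldl_add_skip x xs [x] (by simp)
    _ = x :: (xs.filter (fun y => !(y == x))).foldl PySem.Set.add [] :=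
        foldl_add_cons_out x _ [] hx
    _ = x :: PySem.List.dedup (xs.filter (fun y => !(y == x))) := by
        rw [PySem.List.dedup, PySem.Set.ofList_eq_foldl]

-- first-occurrence dedup commutes with an injective map
theorem dedup_map_inj {α β : Type} [BEq α] [LawfulBEq α] [BEq β] [LawfulBEq β]
    (f : α → β) (hf : Function.Injective f) :
    ∀ (n : Nat) (xs : List α), xs.length ≤ n →
      PySem.List.dedup (xs.map f) = (PySem.List.dedup xs).map f := by
  intro n
  induction n with
  | zero =>
    intro xs h
    have : xs = [] := List.eq_nil_of_length_eq_zero (Nat.le_zero.mp h)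
    subst this; rfl
  | succ n ih =>
    intro xs h
    cases xs with
    | nil => rfl
    | cons x t =>
      rw [List.map_cons, dedup_cons_filter, dedup_cons_filter]
      have hflt : (t.map f).filter (fun y => !(y == f x))
          = (t.filter (fun y => !(y == x))).map f := by
        rw [List.filter_map]
        congr 1
        apply List.filter_congr
        intro d _
        simp [Function.comp, hf.eq_iff]
      rw [hflt, ih _ (le_trans (List.length_filter_le _ t) (by simpa using h)),
        List.map_cons]

-- updating a set with fresh, duplicate-free elements appends them
theorem update_eq_append {α : Type} [BEq α] [LawfulBEq α] :
    ∀ (xs s : List α), xs.Nodup → (∀ y ∈ xs, y ∉ s) →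
      PySem.Set.update s xs = s ++ xs := by
  intro xs
  induction xs with
  | nil => intro s _ _; simp [PySem.Set.update]
  | cons y t ih =>
    intro s hn hd
    have hcf : PySem.Set.contains s y = false := by
      rw [Bool.eq_false_iff]
      intro hc
      exact hd y List.mem_cons_self ((PySem.Set.contains_iff s y).mp hc)
    have hadd : PySem.Set.add s y = s ++ [y] := by
      rw [PySem.Set.add, hcf]; simp
    have hrec := ih (s ++ [y]) (List.Nodup.of_cons hn) (by
      intro z hz
      simp only [List.mem_append, List.mem_singleton]
      rintro (h | rfl)
      · exact hd z (List.mem_cons_of_mem _ hz) h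
      · exact (List.nodup_cons.mp hn).1 hz)
    rw [PySem.Set.update] at hrec ⊢
    rw [List.foldl_cons, hadd, hrec]
    simp

theorem count_filter_length (t : List Char) (c : Char) :
    t.length = (t.filter (fun d => !(d == c))).length + t.count c := by
  induction t with
  | nil => simp
  | cons d t ih =>
    by_cases h : d = c <;> simp [h] <;> omega

-- A's loop body is exactly Counter's modify step.
theorem step_eq_modify (d : PySem.Dict String Int) (z : String) :
    (if d.contains z then d.modify z 0 (· + 1) else d.insert z 1) = d.modify z 0 (· + 1) := by
  by_cases h : d.contains z = true
  · rw [if_pos h]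
  · rw [if_neg h, PySem.Dict.modify,
      PySem.Dict.getD_of_not_contains _ _ (Bool.eq_false_iff.mpr h ▸ rfl)]
    norm_num

theorem wiecej_niz_eq_canon (napis : String) (liczba : Int) :
    wiecej_niz napis liczba = pvCanon liczba napis.toList := by
  have hfold : napis.toList.foldl
      (fun d c =>
        let znak := String.ofList [c]
        if d.contains znak then d.modify znak 0 (· + 1) else d.insert znak 1)
      PySem.Dict.empty
      = PySem.Dict.counter (napis.toList.map (fun c => String.ofList [c])) := by
    rw [PySem.Dict.counter_eq_foldl, List.foldl_map]
    apply PySem.List.foldl_congr_mem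
    intro d c _
    exact step_eq_modify d (String.ofList [c])
  unfold wiecej_niz pvCanon
  simp only [hfold, PySem.Dict.keys_counter, PySem.Dict.getD_counter]
  have h1 : PySem.Set.ofList (napis.toList.map (fun c => String.ofList [c]))
      = (PySem.List.dedup napis.toList).map (fun c => String.ofList [c]) :=
    dedup_map_inj _ ofList_single_injective napis.toList.length napis.toList le_rfl
  rw [h1, List.filter_map]
  have h2 : (PySem.List.dedup napis.toList).filter
        ((fun z => decide (liczba <
            ((napis.toList.map (fun c => String.ofList [c])).count z : Int)))
          ∘ (fun c => String.ofList [c]))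
      = (PySem.List.dedup napis.toList).filter
        (fun d => decide (liczba < (napis.toList.count d : Int))) := by
    apply List.filter_congr
    intro d _
    have := List.count_map_of_injective napis.toList _ ofList_single_injective d
    simp [Function.comp, this]
  rw [h2]
  exact PySem.Set.ofList_eq_self_of_nodup _
    ((List.Nodup.filter _ (PySem.List.nodup_dedup _)).map ofList_single_injective)

theorem go_eq_canon (liczba : Int) : ∀ (cs : List Char),
    wiecejNizGo liczba cs = pvCanon liczba cs := by
  intro cs
  induction cs using wiecejNizGo.induct liczba with
  | case1 => rw [wiecejNizGo]; rfl
  | case2 c t reszta ih =>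
    simp only [wiecejNizGo, replace_single_nil]
    have hresz : reszta = t.filter (fun d => !(d == c)) := by
      show PySem.Chars.replace (c :: t) [c] [] = _
      rw [replace_single_nil]
      simp
    rw [hresz] at ih
    set r : List Char := t.filter (fun d => !(d == c)) with hr
    have hRr : (c :: t).filter (fun d => !(d == c)) = r := by
      simp [hr]
    rw [hRr, ih]
    -- the head condition is exactly "c occurs more than liczba times"
    have hcnt : (liczba < ((c :: t).length : Int) - (r.length : Int))
        ↔ (liczba < ((c :: t).count c : Int)) := by
      have hl := count_filter_length t c
      simp only [List.length_cons, List.count_cons, beq_self_eq_true, if_pos, hr] at *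
      omega
    -- unfold the canonical form one step
    have hcanon : pvCanon liczba (c :: t)
        = (if liczba < ((c :: t).count c : Int) then [String.ofList [c]] else [])
          ++ pvCanon liczba r := by
      unfold pvCanon
      rw [dedup_cons_filter, ← hr, List.filter_cons]
      have htail : (PySem.List.dedup r).filter
            (fun d => decide (liczba < ((c :: t).count d : Int)))
          = (PySem.List.dedup r).filter
            (fun d => decide (liczba < (r.count d : Int))) := by
        apply List.filter_congr
        intro d hd
        have hdc : ¬ (d = c) := by
          have h := List.of_mem_filter (hr ▸ (PySem.List.mem_dedup _ _).mp hd)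
          simp at h
          exact h
        have h2 : r.count d = t.count d := by
          rw [hr, List.count_filter]
          simp [hdc]
        simp [Ne.symm hdc, h2]
      rw [htail]
      simp only [decide_eq_true_eq]
      split_ifs with h
      · simp
      · simp
    rw [hcanon]
    -- the set union of the fresh head with the recursive result is an append
    have hdisj : ∀ z ∈ pvCanon liczba r,
        z ∉ (if liczba < ((c :: t).length : Int) - (r.length : Int)
              then [String.ofList [c]] else []) := by
      intro z hz
      obtain ⟨d, hd, rfl⟩ := List.mem_map.mp hz
      have hdc : ¬ (d = c) := by
        have h := List.of_mem_filter (hr ▸ (PySem.List.mem_dedup _ _).mp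
          (List.mem_of_mem_filter hd))
        simp at h
        exact h
      have hne : ¬ (String.ofList [d] = String.ofList [c]) :=
        fun h => hdc (by simpa using congrArg String.toList h)
      split_ifs with h
      · simpa using hne
      · simp
    have hnodup : (pvCanon liczba r).Nodup :=
      (List.Nodup.filter _ (PySem.List.nodup_dedup _)).map ofList_single_injective
    rw [PySem.Set.union, update_eq_append _ _ hnodup hdisj]
    congr 1
    exact if_congr hcnt rfl rfl

-- ===== VERDICT (by name: the statement is the Claim_ definition above) =====
theorem wiecej_niz_spec : Claim_equal_wiecej_niz := by
  intro napis liczba _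
  unfold Spec_wiecej_niz wiecej_niz_alt
  rw [wiecej_niz_eq_canon, go_eq_canon]
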